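-- pv_equiv track=rewrite | github.com/Njko/aoc_solver | solvers/days/y2015/day_05.py | is_nice_part1
-- ===== SOURCE A (Python) =====
-- def is_nice_part1(s: str) -> bool:
--     # Rule 1: At least 3 vowels
--     vowels = sum(1 for c in s if c in 'aeiou')
--     if vowels < 3:
--         return False
--
--     # Rule 2: At least one letter twice in a row
--     has_double = False
--     for i in range(len(s) - 1):
--         if s[i] == s[i+1]:
--             has_double = True
--             break
--     if not has_double:
--         return False
--
--     # Rule 3: No forbidden strings
--     for forbidden in ['ab', 'cd', 'pq', 'xy']:
--         if forbidden in s: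
--             return False
--
--     return True
-- ===== SOURCE B (Python) =====
-- def is_nice_part1(s: str) -> bool:
--     # Single pass: fold over characters keeping (vowel count, double flag,
--     # forbidden flag, previous character) instead of three separate scans.
--     vowels = 0
--     double = False
--     forbidden = False
--     prev = None
--     for c in s:
--         if c in 'aeiou':
--             vowels += 1
--         if prev is not None:
--             if prev == c:
--                 double = True
--             if prev + c in ('ab', 'cd', 'pq', 'xy'):
--                 forbidden = True
--         prev = c
--     return vowels >= 3 and double and not forbidden
-- ===== Notes on version B (the rewrite author's own statement) =====
-- stated objective: alternative
-- what changed: A makes three separate passes (a vowel-counting scan, an index loop with break for a doubled letter, and four substring searches); B is a single left-to-right pass folding over the characters with an accumulator (vowel count, double flag, forbidden flag, previous char).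
import Mathlib
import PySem

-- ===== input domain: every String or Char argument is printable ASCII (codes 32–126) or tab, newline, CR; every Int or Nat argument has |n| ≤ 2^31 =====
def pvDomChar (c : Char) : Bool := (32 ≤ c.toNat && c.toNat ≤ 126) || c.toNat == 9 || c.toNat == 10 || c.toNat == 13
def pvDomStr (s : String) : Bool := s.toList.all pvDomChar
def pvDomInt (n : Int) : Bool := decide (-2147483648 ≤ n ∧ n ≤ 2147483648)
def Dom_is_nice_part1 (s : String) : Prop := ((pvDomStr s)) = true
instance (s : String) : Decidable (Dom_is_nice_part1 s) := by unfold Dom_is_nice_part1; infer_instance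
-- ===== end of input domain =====

-- B replaces A's three separate scans (vowel count, index loop for a double, four
-- substring searches) by one left-to-right fold carrying (count, double, forbidden, prev).

-- shared helper: Python's «c in 'aeiou'» for a single iterated character is membership (exact)
def vowelMem (c : Char) : Bool := ['a', 'e', 'i', 'o', 'u'].contains c

-- ===== PORT A =====
-- the index loop «for i in range(len(s)-1): if s[i]==s[i+1]: … break» as recursion over the range list
def aDoubleLoop (cs : List Char) : List Int → Bool
  | [] => false
  | i :: rest =>
      if PySem.List.pyGet? cs i = PySem.List.pyGet? cs (i + 1) then true
      else aDoubleLoop cs rest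

-- the «for forbidden in [...]: if forbidden in s: return False» loop
def aForbiddenLoop (s : String) : List String → Bool
  | [] => false
  | f :: rest => if PySem.Str.isIn f s then true else aForbiddenLoop s rest

def is_nice_part1 (s : String) : Bool :=
  let vowels : Int := s.toList.foldl (fun acc c => if vowelMem c then acc + 1 else acc) 0
  if vowels < 3 then false
  else
    let has_double := aDoubleLoop s.toList (PySem.List.pyRange 0 (PySem.Str.len s - 1) 1)
    if !has_double then false
    else if aForbiddenLoop s ["ab", "cd", "pq", "xy"] then false
    else true

-- ===== PORT B =====
-- «prev + c in ('ab','cd','pq','xy')»: the two-char string as a char list, tuple membership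
def forbMem (p c : Char) : Bool :=
  [p, c] == ['a', 'b'] || [p, c] == ['c', 'd'] || [p, c] == ['p', 'q'] || [p, c] == ['x', 'y']

def bStep (st : Int × Bool × Bool × Option Char) (c : Char) :
    Int × Bool × Bool × Option Char :=
  let v := if vowelMem c then st.1 + 1 else st.1
  match st.2.2.2 with
  | none => (v, st.2.1, st.2.2.1, some c)
  | some p => (v, st.2.1 || (p == c), st.2.2.1 || forbMem p c, some c)

def is_nice_part1_alt (s : String) : Bool :=
  let r := s.toList.foldl bStep (0, false, false, none)
  decide (3 ≤ r.1) && r.2.1 && !r.2.2.1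

-- ===== PRECONDITION & SPEC =====
def Spec_is_nice_part1 (s : String) (out : Bool) : Prop := out = is_nice_part1_alt s
instance (s : String) (out : Bool) : Decidable (Spec_is_nice_part1 s out) := by unfold Spec_is_nice_part1; infer_instance

-- ===== CLAIM (what is proved, stated in full; the proofs are below) =====
def Claim_equal_is_nice_part1 : Prop := ∀ (s : String), Dom_is_nice_part1 s → Spec_is_nice_part1 s (is_nice_part1 s)

-- ===== LEMMAS AND PROOFS =====

-- «some adjacent pair satisfies p», the common shape of both programs' pair tests
def adjAny (p : Char → Char → Bool) : List Char → Bool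
  | a :: b :: t => p a b || adjAny p (b :: t)
  | _ => false

theorem adjAny_nil (p : Char → Char → Bool) : adjAny p [] = false := rfl
theorem adjAny_single (p : Char → Char → Bool) (a : Char) : adjAny p [a] = false := rfl
theorem adjAny_cons2 (p : Char → Char → Bool) (a b : Char) (t : List Char) :
    adjAny p (a :: b :: t) = (p a b || adjAny p (b :: t)) := rfl

theorem adjAny_short (p : Char → Char → Bool) (l : List Char) (h : l.length ≤ 1) :
    adjAny p l = false := by
  rcases l with _ | ⟨a, _ | ⟨b, t⟩⟩
  · rfl
  · rfl
  · simp at h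

theorem adjAny_or (p q : Char → Char → Bool) (l : List Char) :
    adjAny (fun a b => p a b || q a b) l = (adjAny p l || adjAny q l) := by
  induction l with
  | nil => rfl
  | cons a t ih =>
    cases t with
    | nil => rfl
    | cons b t' =>
      rw [adjAny_cons2, adjAny_cons2, adjAny_cons2, ih]
      cases p a b <;> cases q a b <;> simp

theorem adjAny_congr (p q : Char → Char → Bool) (l : List Char)
    (h : ∀ a b, p a b = q a b) : adjAny p l = adjAny q l := by
  have : p = q := funext fun a => funext fun b => h a b
  rw [this]

-- A's index loop computes «some adjacent pair is equal»
theorem aDoubleLoop_eq (cs : List Char) (n : Nat) :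
    aDoubleLoop cs (PySem.List.pyRange (n : Int) ((cs.length : Int) - 1) 1)
      = adjAny (· == ·) (cs.drop n) := by
  induction hk : cs.length - n generalizing n with
  | zero =>
    rw [PySem.List.pyRange_one_eq_nil (by omega)]
    rw [List.drop_eq_nil_of_le (by omega)]
    rfl
  | succ k ih =>
    by_cases hlt : n + 1 < cs.length
    · have hc : (n : Int) < (cs.length : Int) - 1 := by omega
      rw [PySem.List.pyRange_one_cons hc]
      have h1 : n < cs.length := by omega
      have hcast : ((n : Int) + 1) = ((n + 1 : Nat) : Int) := by push_cast; ring
      have g1 : PySem.List.pyGet? cs (n : Int) = some cs[n] := by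
        rw [PySem.List.pyGet?_natCast]; exact List.getElem?_eq_getElem h1
      have g2 : PySem.List.pyGet? cs ((n : Int) + 1) = some cs[n+1] := by
        rw [hcast, PySem.List.pyGet?_natCast]; exact List.getElem?_eq_getElem hlt
      have ih' := ih (n + 1) (by omega)
      have e1 : cs.drop n = cs[n] :: cs.drop (n + 1) := List.drop_eq_getElem_cons h1
      have e2 : cs.drop (n + 1) = cs[n+1] :: cs.drop (n + 2) := List.drop_eq_getElem_cons hlt
      show (if PySem.List.pyGet? cs (n : Int) = PySem.List.pyGet? cs ((n : Int) + 1) then true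
            else aDoubleLoop cs (PySem.List.pyRange ((n : Int) + 1) ((cs.length : Int) - 1) 1))
          = adjAny (· == ·) (cs.drop n)
      rw [g1, g2, hcast, ih', e1, e2, adjAny_cons2, ← e2]
      by_cases h : cs[n] = cs[n+1]
      · simp [h]
      · simp [h]
    · rw [PySem.List.pyRange_one_eq_nil (by omega)]
      rw [adjAny_short _ _ (by simp; omega)]
      rfl

-- a two-character substring test is an adjacent-pair test
theorem isIn_pair (a b : Char) (cs : List Char) :
    PySem.Chars.isIn [a, b] cs = adjAny (fun x y => x == a && y == b) cs := by
  rw [Bool.eq_iff_iff, PySem.Chars.isIn_iff_infix]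
  induction cs with
  | nil => simp [adjAny_nil]
  | cons c t ih =>
    cases t with
    | nil =>
      simp [adjAny_single, List.infix_cons_iff, List.cons_prefix_cons]
    | cons d t' =>
      rw [List.infix_cons_iff, ih, adjAny_cons2]
      simp only [List.cons_prefix_cons, List.nil_prefix, and_true,
        Bool.or_eq_true, Bool.and_eq_true, beq_iff_eq]
      constructor
      · rintro (⟨rfl, rfl⟩ | h) <;> tauto
      · rintro (⟨rfl, rfl⟩ | h) <;> tauto

-- B's fold, characterised after the first character
theorem foldB (l : List Char) (v : Int) (d f : Bool) (p : Char) :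
    l.foldl bStep (v, d, f, some p)
      = (v + (l.countP vowelMem : Int), d || adjAny (· == ·) (p :: l),
         f || adjAny forbMem (p :: l), some ((p :: l).getLast (by simp))) := by
  induction l generalizing v d f p with
  | nil => simp [adjAny_single]
  | cons c t ih =>
    rw [List.foldl_cons]
    show List.foldl bStep
        (if vowelMem c then v + 1 else v, d || (p == c), f || forbMem p c, some c) t = _
    rw [ih]
    simp only [Prod.mk.injEq, adjAny_cons2]
    refine ⟨?_, ?_, ?_, ?_⟩
    · rw [List.countP_cons]
      split_ifs <;> push_cast <;> ring
    · cases d <;> cases (p == c) <;> simp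
    · cases f <;> cases forbMem p c <;> simp
    · simp [List.getLast_cons]

theorem forbMem_eq (p c : Char) :
    forbMem p c = ((p == 'a' && c == 'b') || ((p == 'c' && c == 'd') ||
      ((p == 'p' && c == 'q') || (p == 'x' && c == 'y')))) := by
  have e : ∀ (x y a b : Char), ([x, y] == [a, b]) = (x == a && y == b) := by
    intro x y a b
    show (x == a && (y == b && true)) = _
    rw [Bool.and_true]
  simp only [forbMem, e, Bool.or_assoc]

-- A's vowel fold is a countP
theorem aVowels_eq (s : String) :
    s.toList.foldl (fun acc c => if vowelMem c then acc + 1 else acc) (0 : Int)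
      = (s.toList.countP vowelMem : Int) := by
  rw [PySem.List.foldl_if_add_one]
  ring

theorem aDouble_eq (s : String) :
    aDoubleLoop s.toList (PySem.List.pyRange 0 (PySem.Str.len s - 1) 1)
      = adjAny (· == ·) s.toList := by
  have h := aDoubleLoop_eq s.toList 0
  simp only [Nat.cast_zero, List.drop_zero] at h
  rw [PySem.Str.len_eq]
  exact h

-- A's forbidden-substring loop is an adjacent-pair test for the four pairs
theorem aForb_eq (s : String) :
    aForbiddenLoop s ["ab", "cd", "pq", "xy"] = adjAny forbMem s.toList := by
  have hb : ∀ (x r : Bool), (if x = true then true else r) = (x || r) := by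
    intro x r; cases x <;> simp
  simp only [aForbiddenLoop]
  rw [hb, hb, hb, hb]
  simp only [Bool.or_false, PySem.Str.isIn_eq]
  have t1 : "ab".toList = ['a', 'b'] := rfl
  have t2 : "cd".toList = ['c', 'd'] := rfl
  have t3 : "pq".toList = ['p', 'q'] := rfl
  have t4 : "xy".toList = ['x', 'y'] := rfl
  rw [t1, t2, t3, t4, isIn_pair, isIn_pair, isIn_pair, isIn_pair,
    ← adjAny_or, ← adjAny_or, ← adjAny_or]
  refine adjAny_congr _ _ _ (fun a b => ?_)
  simp [forbMem_eq]

-- the two sides, reduced to the same three quantities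
theorem A_reduced (s : String) : is_nice_part1 s
    = (if ((s.toList.countP vowelMem : Int)) < 3 then false
       else if !adjAny (· == ·) s.toList then false
       else if adjAny forbMem s.toList then false else true) := by
  unfold is_nice_part1
  simp only [aVowels_eq, aDouble_eq, aForb_eq]

theorem B_reduced (s : String) : is_nice_part1_alt s
    = (decide (3 ≤ (s.toList.countP vowelMem : Int)) && adjAny (· == ·) s.toList
        && !adjAny forbMem s.toList) := by
  unfold is_nice_part1_alt
  cases hl : s.toList with
  | nil => simp [adjAny_nil]
  | cons c t =>
    rw [List.foldl_cons]
    have hstep : bStep (0, false, false, none) c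
        = (if vowelMem c then (0 : Int) + 1 else 0, false, false, some c) := rfl
    rw [hstep, foldB]
    have hc : (if vowelMem c then (0 : Int) + 1 else 0) + (t.countP vowelMem : Int)
        = (((c :: t).countP vowelMem : Nat) : Int) := by
      rw [List.countP_cons]
      split_ifs <;> push_cast <;> ring
    rw [hc]
    simp

-- ===== VERDICT (by name: the statement is the Claim_ definition above) =====
theorem is_nice_part1_spec : Claim_equal_is_nice_part1 := by
  unfold Claim_equal_is_nice_part1
  intro s _
  unfold Spec_is_nice_part1
  rw [A_reduced, B_reduced]
  by_cases h3 : (s.toList.countP vowelMem : Int) < 3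
  · simp [h3, show ¬(3 ≤ (s.toList.countP vowelMem : Int)) by omega]
  · cases hd : adjAny (· == ·) s.toList <;> cases hf : adjAny forbMem s.toList <;>
      simp [h3, show (3 ≤ (s.toList.countP vowelMem : Int)) by omega]
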